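-- pv_equiv track=rewrite | github.com/gudeqing/biodev | smallScripts/avenio_mutation_mapping.py | aa_three2one
-- ===== SOURCE A (Python) =====
-- def aa_three2one(phgvs):
--     if type(phgvs) != str:
--         return phgvs
--     d = {'CYS': 'C', 'ASP': 'D', 'SER': 'S', 'GLN': 'Q', 'LYS': 'K',
--          'ILE': 'I', 'PRO': 'P', 'THR': 'T', 'PHE': 'F', 'ASN': 'N',
--          'GLY': 'G', 'HIS': 'H', 'LEU': 'L', 'ARG': 'R', 'TRP': 'W',
--          'ALA': 'A', 'VAL': 'V', 'GLU': 'E', 'TYR': 'Y', 'MET': 'M'}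
--     aad = {x.lower().capitalize(): y for x, y in d.items()}
--     for k, v in aad.items():
--         phgvs = phgvs.replace(k, v)
--     return phgvs
-- ===== SOURCE B (Python) =====
-- def aa_three2one(phgvs):
--     if type(phgvs) != str:
--         return phgvs
--     aad = {'Cys': 'C', 'Asp': 'D', 'Ser': 'S', 'Gln': 'Q', 'Lys': 'K',
--            'Ile': 'I', 'Pro': 'P', 'Thr': 'T', 'Phe': 'F', 'Asn': 'N',
--            'Gly': 'G', 'His': 'H', 'Leu': 'L', 'Arg': 'R', 'Trp': 'W',
--            'Ala': 'A', 'Val': 'V', 'Glu': 'E', 'Tyr': 'Y', 'Met': 'M'}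
--     out = []
--     i = 0
--     while i < len(phgvs):
--         chunk = phgvs[i:i + 3]
--         if chunk in aad:
--             out.append(aad[chunk])
--             i += 3
--         else:
--             out.append(phgvs[i])
--             i += 1
--     return ''.join(out)
-- ===== Notes on version B (the rewrite author's own statement) =====
-- stated objective: alternative
-- what changed: A makes 20 sequential str.replace passes over the string; B makes one left-to-right scan that translates each 3-letter code where it stands, so later passes can never re-translate a letter emitted by an earlier pass.
-- intended difference: On strings containing 'Prohe', 'Thrrp', 'Thryr' or 'Glylu', A's earlier replace pass emits a letter that together with the following raw text forms a later code which the later pass translates again (A('Prohe')='F'), while B translates each code from the original text exactly once (B('Prohe')='Phe'); the one-translation-per-original-code value is the intended one for mapping p.HGVS codes. — e.g. on aa_three2one("Prohe"): A returns "F", B returns "Phe"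
import Mathlib
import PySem

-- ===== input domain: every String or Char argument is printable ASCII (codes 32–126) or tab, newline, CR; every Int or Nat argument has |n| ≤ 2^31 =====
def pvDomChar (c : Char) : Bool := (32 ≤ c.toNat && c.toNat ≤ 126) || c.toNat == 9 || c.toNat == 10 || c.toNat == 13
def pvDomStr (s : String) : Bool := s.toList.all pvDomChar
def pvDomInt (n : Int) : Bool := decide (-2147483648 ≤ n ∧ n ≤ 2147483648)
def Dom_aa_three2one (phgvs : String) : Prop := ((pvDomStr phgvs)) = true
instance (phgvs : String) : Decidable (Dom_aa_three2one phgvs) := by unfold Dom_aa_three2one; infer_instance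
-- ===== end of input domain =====

-- B replaces A's 20 sequential str.replace passes by one left-to-right scan over the string;
-- on the four cascade substrings ('Prohe','Thrrp','Thryr','Glylu') A double-translates and B
-- returns the intended one-translation-per-code value (the D_ region below).


-- ===== PORT A =====
-- the dict literal d (insertion order kept)
def aaDictA : List (String × String) :=
  [("CYS","C"),("ASP","D"),("SER","S"),("GLN","Q"),("LYS","K"),
   ("ILE","I"),("PRO","P"),("THR","T"),("PHE","F"),("ASN","N"),
   ("GLY","G"),("HIS","H"),("LEU","L"),("ARG","R"),("TRP","W"),
   ("ALA","A"),("VAL","V"),("GLU","E"),("TYR","Y"),("MET","M")]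

-- str.capitalize, ported by hand (PySem has no capitalize): first char uppercased, rest
-- lowercased; exact on the ASCII domain
def pyCapitalize (s : String) : String :=
  match s.toList with
  | [] => ""
  | c :: t => String.ofList (PySem.Chars.upperChar c :: PySem.Chars.lower t)

-- A: aad = {x.lower().capitalize(): y for x, y in d.items()} (capitalized keys are distinct, so
-- the comprehension is a map in insertion order), then
-- `for k, v in aad.items(): phgvs = phgvs.replace(k, v)`.
-- The `type(phgvs) != str` guard of the Python is unreachable here: phgvs is a String.
def aa_three2one (phgvs : String) : String :=
  let aad := aaDictA.map (fun kv => (pyCapitalize (PySem.Str.lower kv.1), kv.2))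
  aad.foldl (fun s kv => PySem.Str.replace s kv.1 kv.2) phgvs

-- ===== PORT B =====
-- the dict literal aad of Source B (insertion order kept), keys as char lists, values single chars
def aaKeys : List (List Char × Char) :=
  [("Cys".toList,'C'),("Asp".toList,'D'),("Ser".toList,'S'),("Gln".toList,'Q'),("Lys".toList,'K'),
   ("Ile".toList,'I'),("Pro".toList,'P'),("Thr".toList,'T'),("Phe".toList,'F'),("Asn".toList,'N'),
   ("Gly".toList,'G'),("His".toList,'H'),("Leu".toList,'L'),("Arg".toList,'R'),("Trp".toList,'W'),
   ("Ala".toList,'A'),("Val".toList,'V'),("Glu".toList,'E'),("Tyr".toList,'Y'),("Met".toList,'M')]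

-- Source B's while loop over the index i as structural recursion on the remaining characters:
-- chunk = phgvs[i:i+3]; on a dict hit append the letter and advance 3, else copy one char
def bGo (ks : List (List Char × Char)) : List Char → List Char
  | [] => []
  | c :: t =>
    match ks.lookup ((c :: t).take 3) with
    | some v => v :: bGo ks (t.drop 2)
    | none   => c :: bGo ks t
termination_by l => l.length
decreasing_by
  all_goals simp [List.length_drop]

-- ''.join(out)
def aa_three2one_alt (phgvs : String) : String :=
  String.ofList (bGo aaKeys phgvs.toList)

-- ===== PRECONDITION & SPEC =====
-- On strings containing 'Prohe', 'Thrrp', 'Thryr' or 'Glylu', an earlier replace pass of A emits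
-- a letter that together with the following raw text forms a later three-letter code which a
-- later pass translates again (A "Prohe" = "F"), while B translates each code of the original
-- text exactly once (B "Prohe" = "Phe"); B's value is the intended one for mapping p.HGVS codes.
def D_aa_three2one (phgvs : String) : Prop :=
  PySem.Str.isIn "Prohe" phgvs = true ∨ PySem.Str.isIn "Thrrp" phgvs = true ∨
  PySem.Str.isIn "Thryr" phgvs = true ∨ PySem.Str.isIn "Glylu" phgvs = true
instance (phgvs : String) : Decidable (D_aa_three2one phgvs) := by unfold D_aa_three2one; infer_instance

def Spec_aa_three2one (phgvs : String) (out : String) : Prop := ¬ D_aa_three2one phgvs → out = aa_three2one_alt phgvs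
instance (phgvs : String) (out : String) : Decidable (Spec_aa_three2one phgvs out) := by unfold Spec_aa_three2one; infer_instance

def pvDiffWitness_aa_three2one : String := "Prohe"
def pvDiffWitnessOut_aa_three2one : String × String := ("F", "Phe")

-- ===== CLAIM (what is proved, stated in full; the proofs are below) =====
def Claim_unchanged_aa_three2one : Prop := ∀ (phgvs : String), Dom_aa_three2one phgvs → Spec_aa_three2one phgvs (aa_three2one phgvs)
def Claim_changed_aa_three2one : Prop := Dom_aa_three2one (pvDiffWitness_aa_three2one) ∧ D_aa_three2one (pvDiffWitness_aa_three2one) ∧ aa_three2one (pvDiffWitness_aa_three2one) = pvDiffWitnessOut_aa_three2one.1 ∧ aa_three2one_alt (pvDiffWitness_aa_three2one) = pvDiffWitnessOut_aa_three2one.2 ∧ pvDiffWitnessOut_aa_three2one.1 ≠ pvDiffWitnessOut_aa_three2one.2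
def Claim_exact_aa_three2one : Prop := ∀ (phgvs : String), Dom_aa_three2one phgvs → D_aa_three2one phgvs → aa_three2one phgvs ≠ aa_three2one_alt phgvs

-- ===== LEMMAS AND PROOFS =====

-- A single str.replace pass, rewritten from the accumulator shape of PySem.Chars.replace.go to
-- a direct scan (go_eq_rf below), so that heads of its output can be analysed
def rf (k : List Char) (nv : List Char) : Nat → List Char → List Char
  | 0, l => l
  | _ + 1, [] => []
  | fuel + 1, c :: t =>
    if k.isPrefixOf (c :: t) then nv ++ rf k nv fuel ((c :: t).drop k.length)
    else c :: rf k nv fuel t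

lemma go_eq_rf (k nv : List Char) : ∀ fuel l acc,
    PySem.Chars.replace.go k nv fuel l acc = acc.reverse ++ rf k nv fuel l := by
  intro fuel
  induction fuel with
  | zero => intro l acc; cases l <;> simp [PySem.Chars.replace.go, rf]
  | succ f ih =>
    intro l acc
    cases l with
    | nil => simp [PySem.Chars.replace.go, rf]
    | cons c t =>
      rw [PySem.Chars.replace.go, rf]
      split
      · rw [ih]; simp
      · rw [ih]; simp

lemma replace_eq_rf (k nv l : List Char) (hk : k ≠ []) :
    PySem.Chars.replace l k nv = rf k nv l.length l := by
  rw [PySem.Chars.replace]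
  simp [hk, go_eq_rf]

def upC (c : Char) : Bool := decide ('A' ≤ c ∧ c ≤ 'Z')
def loC (c : Char) : Bool := decide ('a' ≤ c ∧ c ≤ 'z')
lemma not_up_of_lo {c : Char} (h : loC c = true) : upC c = false := by
  simp [upC, loC, Char.le_def, UInt32.le_iff_toNat_le] at *; omega
def shapedKV : (List Char × Char) → Bool
  | ([u, a, b], v) => upC u && loC a && loC b && upC v
  | _ => false
lemma mem_of_lookup {α β : Type} [BEq α] [LawfulBEq α] {k : α} {l : List (α × β)} {v : β}
    (h : List.lookup k l = some v) : (k, v) ∈ l := by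
  induction l with
  | nil => simp [List.lookup] at h
  | cons p t ih =>
    obtain ⟨a, b⟩ := p
    rw [List.lookup_cons] at h
    split at h
    · next hb => simp at hb h; subst hb; subst h; exact List.mem_cons_self
    · exact List.mem_cons_of_mem _ (ih h)
lemma lookup_shape {ks : List (List Char × Char)} (hs : ∀ kv ∈ ks, shapedKV kv = true)
    {w : List Char} {v' : Char} (hl : ks.lookup w = some v') :
    ∃ u a b, w = [u, a, b] ∧ upC u = true ∧ loC a = true ∧ loC b = true := by
  have hm := mem_of_lookup hl
  have := hs _ hm
  match w, this with
  | [], h => simp [shapedKV] at h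
  | [u], h => simp [shapedKV] at h
  | [u, a], h => simp [shapedKV] at h
  | u :: a :: b :: c :: t, h => simp [shapedKV] at h
  | [u, a, b], h =>
    simp [shapedKV] at h
    exact ⟨u, a, b, rfl, h.1.1.1, h.1.1.2, h.1.2⟩

lemma one_raw {u a b v y : Char} {fuel : Nat} {m : List Char}
    (hv : upC v = true) (hy : loC y = true)
    (h : (rf [u, a, b] [v] fuel m).take 1 = [y]) : m.take 1 = [y] := by
  cases fuel with
  | zero => simpa [rf] using h
  | succ f =>
    cases m with
    | nil => simp [rf] at h
    | cons c t =>
      rw [rf] at h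
      split at h
      · simp at h
        rw [← h] at hy
        rw [not_up_of_lo hy] at hv
        exact absurd hv (by simp)
      · simpa using h

lemma two_raw {u a b v x y : Char} {fuel : Nat} {m : List Char}
    (hv : upC v = true) (hx : loC x = true) (hy : loC y = true)
    (h : (rf [u, a, b] [v] fuel m).take 2 = [x, y]) : m.take 2 = [x, y] := by
  cases fuel with
  | zero => simpa [rf] using h
  | succ f =>
    cases m with
    | nil => simp [rf] at h
    | cons c t =>
      rw [rf] at h
      split at h
      · simp at h
        rw [← h.1] at hx
        rw [not_up_of_lo hx] at hv
        exact absurd hv (by simp)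
      · simp at h ⊢
        refine ⟨h.1, ?_⟩
        have := one_raw (u := u) (a := a) (b := b) hv hy (by
          simpa using h.2)
        simpa using this

lemma rf_prefix_raw {k : List Char} {v : Char} :
    ∀ fuel (t m : List Char), v ∉ t → t <+: rf k [v] fuel m → t <+: m := by
  intro fuel
  induction fuel with
  | zero => intro t m _ h; simpa [rf] using h
  | succ f ih =>
    intro t m hv h
    cases m with
    | nil => simp [rf] at h; simp [h]
    | cons c tm =>
      rw [rf] at h
      split at h
      · cases t with
        | nil => simp
        | cons x t' =>
          obtain ⟨hx, _⟩ := (List.cons_prefix_cons).mp h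
          exact absurd hx (by simp at hv; exact fun hh => hv.1 hh.symm)
      · cases t with
        | nil => simp
        | cons x t' =>
          obtain ⟨hx, hp⟩ := (List.cons_prefix_cons).mp h
          subst hx
          have := ih t' tm (fun hm => hv (List.mem_cons_of_mem _ hm)) hp
          exact List.cons_prefix_cons.mpr ⟨rfl, this⟩

lemma rf_infix_raw {k : List Char} {v : Char} :
    ∀ fuel (t m : List Char), v ∉ t → t <:+: rf k [v] fuel m → t <:+: m := by
  intro fuel
  induction fuel with
  | zero => intro t m _ h; simpa [rf] using h
  | succ f ih =>
    intro t m hv h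
    cases m with
    | nil => simp [rf] at h; simp [h]
    | cons c tm =>
      rw [rf] at h
      split at h
      · rcases List.infix_cons_iff.mp h with hpre | hinf
        · have := rf_prefix_raw (f + 1) t (c :: tm) hv (by rw [rf, if_pos ‹_›]; exact hpre)
          exact this.isInfix
        · have := ih t _ hv hinf
          exact this.trans (List.drop_suffix _ _).isInfix
      · rcases List.infix_cons_iff.mp h with hpre | hinf
        · have := rf_prefix_raw (f + 1) t (c :: tm) hv (by rw [rf, if_neg ‹_›]; exact hpre)
          exact this.isInfix
        · exact (ih t tm hv hinf).trans (List.suffix_cons c tm).isInfix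

-- no ks'-key can fire at position 0, 1 or 2 inside an occurrence of the key [u,a,b] followed by
-- chars x y whenever that occurrence lies in l (keys are Upper-lower-lower, so only the cascade
-- window [v,x,y] could fire, and noCasc forbids it)
def noCasc (k : List Char) (v : Char) (ks' : List (List Char × Char)) (l : List Char) : Prop :=
  ∀ x y r, (k ++ x :: y :: r) <:+: l → ks'.lookup [v, x, y] = none

lemma rf_nil (k nv : List Char) : ∀ fuel, rf k nv fuel [] = [] := by
  intro fuel; cases fuel <;> simp [rf]

lemma ne_of_up_lo {c d : Char} (hc : upC c = true) (hd : loC d = true) : c ≠ d := by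
  intro h; subst h; rw [not_up_of_lo hd] at hc; exact absurd hc (by simp)


lemma lookup_short1 {kss : List (List Char × Char)} (hss : ∀ kv ∈ kss, shapedKV kv = true)
    (c : Char) : kss.lookup [c] = none := by
  cases hlk : kss.lookup [c] with
  | none => rfl
  | some v' => obtain ⟨_, _, _, habs, _⟩ := lookup_shape hss hlk; simp at habs

lemma lookup_short2 {kss : List (List Char × Char)} (hss : ∀ kv ∈ kss, shapedKV kv = true)
    (c d : Char) : kss.lookup [c, d] = none := by
  cases hlk : kss.lookup [c, d] with
  | none => rfl
  | some v' => obtain ⟨_, _, _, habs, _⟩ := lookup_shape hss hlk; simp at habs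

lemma bGo_nil' (kss : List (List Char × Char)) : bGo kss [] = [] := by simp [bGo]

lemma bGo_single {kss : List (List Char × Char)} (hss : ∀ kv ∈ kss, shapedKV kv = true)
    (c : Char) : bGo kss [c] = [c] := by
  rw [bGo]
  simp only [List.take, lookup_short1 hss]
  rw [bGo_nil']

lemma bGo_pair {kss : List (List Char × Char)} (hss : ∀ kv ∈ kss, shapedKV kv = true)
    (c d : Char) : bGo kss [c, d] = [c, d] := by
  rw [bGo]
  simp only [List.take, List.drop, lookup_short2 hss]
  rw [bGo_single hss]

lemma npre_short2 {u a b c1 c2 : Char} : ([u, a, b].isPrefixOf [c1, c2]) ≠ true := by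
  simp [List.isPrefixOf]


lemma npre_of_ne {u a b c : Char} {t : List Char} (h : u ≠ c) :
    ([u, a, b].isPrefixOf (c :: t)) ≠ true := by
  simp [List.isPrefixOf, h]

lemma take2_shape {rest : List Char} {x y : Char} (h : rest.take 2 = [x, y]) :
    rest = x :: y :: rest.drop 2 := by
  cases rest with
  | nil => simp at h
  | cons p q =>
    cases q with
    | nil => simp at h
    | cons p' q' => simp at h ⊢; exact ⟨h.1, h.2⟩

lemma zip_pass {u a b : Char} {v : Char} {ks' : List (List Char × Char)}
    (hkv : shapedKV ([u, a, b], v) = true) (hs : ∀ kv ∈ ks', shapedKV kv = true) :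
    ∀ fuel (l : List Char), l.length ≤ fuel → noCasc [u, a, b] v ks' l →
      bGo ks' (rf [u, a, b] [v] fuel l) = bGo (([u, a, b], v) :: ks') l := by
  have hu : upC u = true := by simp [shapedKV] at hkv; exact hkv.1.1.1
  have hla : loC a = true := by simp [shapedKV] at hkv; exact hkv.1.1.2
  have hlb : loC b = true := by simp [shapedKV] at hkv; exact hkv.1.2
  have hv : upC v = true := by simp [shapedKV] at hkv; exact hkv.2
  have hcons : ∀ kv ∈ (([u, a, b], v) :: ks'), shapedKV kv = true := by
    intro kv hkv'
    rcases List.mem_cons.mp hkv' with h | h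
    · subst h; exact hkv
    · exact hs _ h
  intro fuel
  induction fuel using Nat.strong_induction_on with
  | _ fuel ih =>
  intro l hlen hnc
  cases l with
  | nil => rw [rf_nil, bGo_nil', bGo_nil']
  | cons c1 t1 =>
  cases t1 with
  | nil =>
    obtain ⟨f, rfl⟩ : ∃ f, fuel = f + 1 := ⟨fuel - 1, by simp at hlen; omega⟩
    rw [rf, if_neg (by simp [List.isPrefixOf]), rf_nil, bGo_single hs, bGo_single hcons]
  | cons c2 t2 =>
  cases t2 with
  | nil =>
    obtain ⟨f, rfl⟩ : ∃ f, fuel = f + 2 := ⟨fuel - 2, by simp at hlen; omega⟩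
    rw [rf, if_neg npre_short2, rf, if_neg (by simp [List.isPrefixOf]), rf_nil,
        bGo_pair hs, bGo_pair hcons]
  | cons c3 rest =>
    obtain ⟨f, rfl⟩ : ∃ f, fuel = f + 1 := ⟨fuel - 1, by simp at hlen; omega⟩
    have hlen' : rest.length + 3 ≤ f + 1 := by simpa using hlen
    by_cases hpre : ([u, a, b].isPrefixOf (c1 :: c2 :: c3 :: rest)) = true
    · -- the key matches at the head: A's pass emits v here, and so does the scan
      obtain ⟨h1, h2, h3⟩ : u = c1 ∧ a = c2 ∧ b = c3 := by
        simpa [List.isPrefixOf] using hpre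
      subst h1; subst h2; subst h3
      rw [rf, if_pos hpre]
      simp only [show List.drop [u, a, b].length (u :: a :: b :: rest) = rest from by simp,
        List.singleton_append]
      -- LHS: no ks'-key can match at the emitted v (shape or the noCasc hypothesis)
      have hnone : ks'.lookup ((v :: rf [u, a, b] [v] f rest).take 3) = none := by
        cases hlk : ks'.lookup ((v :: rf [u, a, b] [v] f rest).take 3) with
        | none => rfl
        | some v'' =>
          obtain ⟨u', a', b', hw, hu', hla', hlb'⟩ := lookup_shape hs hlk
          simp only [List.take] at hw
          have htk : (rf [u, a, b] [v] f rest).take 2 = [a', b'] := by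
            cases hw0 : (rf [u, a, b] [v] f rest) with
            | nil => rw [hw0] at hw; simp at hw
            | cons z zs =>
              rw [hw0] at hw
              cases zs with
              | nil => simp at hw
              | cons z' zs' => simp at hw ⊢; exact ⟨hw.2.1, hw.2.2⟩
          have hvu : v = u' := by
            cases hw0 : (rf [u, a, b] [v] f rest) with
            | nil => rw [hw0] at hw; simp at hw
            | cons z zs =>
              rw [hw0] at hw
              cases zs with
              | nil => simp at hw
              | cons z' zs' => simp at hw; exact hw.1
          have hraw := two_raw (u := u) (a := a) (b := b) hv hla' hlb' htk
          have hrest := take2_shape hraw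
          have hnone' := hnc a' b' (rest.drop 2) (by rw [hrest]; exact List.infix_refl _)
          have htk3 : (v :: rf [u, a, b] [v] f rest).take 3 = [v, a', b'] := by
            simp only [List.take_succ_cons, htk]
          rw [htk3] at hlk
          rw [hnone'] at hlk
          cases hlk
      rw [bGo, hnone]
      have ihtail := ih f (by omega) rest (by omega) (by
        intro x y r hinf
        exact hnc x y r (hinf.trans
          (((List.suffix_cons b rest).trans (List.suffix_cons a _)).trans (List.suffix_cons u _)).isInfix))
      rw [ihtail]
      rw [bGo]
      simp [List.lookup_cons]
    · -- the key does not match at the head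
      have hne : ¬ (([c1, c2, c3] : List Char) = [u, a, b]) := by
        intro h
        simp at h
        exact hpre (by simp [List.isPrefixOf, h.1, h.2.1, h.2.2])
      rw [rf, if_neg hpre]
      cases hlk3 : List.lookup [c1, c2, c3] ks' with
      | some v' =>
        obtain ⟨u', a', b', hw, hu', hla', hlb'⟩ := lookup_shape hs hlk3
        obtain ⟨e1, e2, e3⟩ : c1 = u' ∧ c2 = a' ∧ c3 = b' := by simpa using hw
        subst e1; subst e2; subst e3
        obtain ⟨f'', rfl⟩ : ∃ f'', f = f'' + 2 := ⟨f - 2, by omega⟩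
        rw [rf, if_neg (npre_of_ne (ne_of_up_lo hu hla'))]
        rw [rf, if_neg (npre_of_ne (ne_of_up_lo hu hlb'))]
        have ihtail := ih f'' (by omega) rest (by omega) (by
          intro x y r hinf
          exact hnc x y r (hinf.trans
            (((List.suffix_cons c3 rest).trans (List.suffix_cons c2 _)).trans
              (List.suffix_cons c1 _)).isInfix))
        rw [bGo]
        simp only [List.take_succ_cons, List.take_zero, hlk3, List.drop_succ_cons, List.drop_zero]
        rw [ihtail, bGo]
        simp only [List.take_succ_cons, List.take_zero, List.lookup_cons, List.drop_succ_cons,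
          List.drop_zero]
        rw [show (([c1, c2, c3] : List Char) == [u, a, b]) = false from beq_eq_false_iff_ne.mpr hne]
        rw [hlk3]
      | none =>
        have hnone : List.lookup ((c1 :: rf [u, a, b] [v] f (c2 :: c3 :: rest)).take 3) ks' = none := by
          cases hlk : List.lookup ((c1 :: rf [u, a, b] [v] f (c2 :: c3 :: rest)).take 3) ks' with
          | none => rfl
          | some v'' =>
            obtain ⟨u', a', b', hw, hu', hla', hlb'⟩ := lookup_shape hs hlk
            simp only [List.take] at hw
            have htk : (rf [u, a, b] [v] f (c2 :: c3 :: rest)).take 2 = [a', b'] := by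
              cases hw0 : (rf [u, a, b] [v] f (c2 :: c3 :: rest)) with
              | nil => rw [hw0] at hw; simp at hw
              | cons z zs =>
                rw [hw0] at hw
                cases zs with
                | nil => simp at hw
                | cons z' zs' => simp at hw ⊢; exact ⟨hw.2.1, hw.2.2⟩
            have hraw := two_raw (u := u) (a := a) (b := b) hv hla' hlb' htk
            obtain ⟨e2, e3⟩ : c2 = a' ∧ c3 = b' := by simpa using hraw
            have htk3 : (c1 :: rf [u, a, b] [v] f (c2 :: c3 :: rest)).take 3 = [c1, c2, c3] := by
              simp only [List.take_succ_cons, htk, ← e2, ← e3]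
            rw [htk3] at hlk
            rw [hlk3] at hlk
            cases hlk
        rw [bGo, hnone]
        have ihtail := ih f (by omega) (c2 :: c3 :: rest)
          (by simp only [List.length_cons] at hlen' ⊢; omega) (by
          intro x y r hinf
          exact hnc x y r (hinf.trans (List.suffix_cons c1 _).isInfix))
        rw [ihtail]
        conv_rhs => rw [bGo]
        simp only [List.take_succ_cons, List.take_zero, List.lookup_cons]
        rw [show (([c1, c2, c3] : List Char) == [u, a, b]) = false from beq_eq_false_iff_ne.mpr hne]
        rw [hlk3]

def trigsOf (k : List Char) (v : Char) (ks' : List (List Char × Char)) : List (List Char) :=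
  ks'.filterMap (fun kv =>
    match kv.1 with
    | x :: rest => if x = v then some (k ++ rest) else none
    | [] => none)

def allTrigs : List (List Char × Char) → List (List Char)
  | [] => []
  | (k, v) :: ks' => trigsOf k v ks' ++ allTrigs ks'

def goodKeys : List (List Char × Char) → Bool
  | [] => true
  | (k, v) :: ks' => shapedKV (k, v) && (allTrigs ks').all (fun t => !(t.contains v)) && goodKeys ks'

lemma noCasc_of_triggers {k : List Char} {v : Char} {ks' : List (List Char × Char)} {l : List Char}
    (h : ∀ t ∈ trigsOf k v ks', ¬ t <:+: l) : noCasc k v ks' l := by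
  intro x y r hinf
  cases hlk : List.lookup [v, x, y] ks' with
  | none => rfl
  | some v' =>
    exfalso
    have hmem := mem_of_lookup hlk
    have htrig : (k ++ [x, y]) ∈ trigsOf k v ks' := by
      apply List.mem_filterMap.mpr
      exact ⟨([v, x, y], v'), hmem, by simp⟩
    apply h _ htrig
    have hpp : (k ++ [x, y]) <+: (k ++ x :: y :: r) := by
      exact ⟨r, by simp⟩
    exact hpp.isInfix.trans hinf

lemma shaped_of_good : ∀ ks, goodKeys ks = true → ∀ kv ∈ ks, shapedKV kv = true := by
  intro ks
  induction ks with
  | nil => intro _ kv hm; simp at hm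
  | cons p t ih =>
    obtain ⟨k, v⟩ := p
    intro hg kv hm
    rw [goodKeys] at hg
    simp only [Bool.and_eq_true] at hg
    rcases List.mem_cons.mp hm with h | h
    · subst h; exact hg.1.1
    · exact ih hg.2 _ h

lemma fold_eq_scan : ∀ ks, goodKeys ks = true → ∀ l, (∀ t ∈ allTrigs ks, ¬ t <:+: l) →
    List.foldl (fun m (kv : List Char × Char) => PySem.Chars.replace m kv.1 [kv.2]) l ks = bGo ks l := by
  intro ks
  induction ks with
  | nil =>
    intro _ l _
    rw [List.foldl_nil]
    induction l with
    | nil => rw [bGo_nil']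
    | cons c t iht => rw [bGo]; simp only [List.lookup_nil]; rw [← iht (by simp [allTrigs])]
  | cons p ks' ih =>
    obtain ⟨k, v⟩ := p
    intro hg l htr
    rw [goodKeys] at hg
    simp only [Bool.and_eq_true] at hg
    obtain ⟨⟨hsh, hfree⟩, hg'⟩ := hg
    obtain ⟨u, a, b, rfl⟩ : ∃ u a b, k = [u, a, b] := by
      match k, hsh with
      | [u, a, b], _ => exact ⟨u, a, b, rfl⟩
    have hknil : ([u, a, b] : List Char) ≠ [] := by simp
    rw [List.foldl_cons]
    have hrepl := replace_eq_rf [u, a, b] [v] l hknil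
    rw [hrepl]
    have hshks' := shaped_of_good ks' hg'
    have hvfree : ∀ t ∈ allTrigs ks', v ∉ t := by
      intro t ht
      have := (List.all_eq_true.mp hfree) t ht
      simpa using this
    have htr' : ∀ t ∈ allTrigs ks', ¬ t <:+: rf [u, a, b] [v] l.length l := by
      intro t ht hinf
      exact htr t (by rw [allTrigs]; exact List.mem_append_right _ ht)
        (rf_infix_raw _ _ _ (hvfree t ht) hinf)
    rw [ih hg' _ htr']
    exact zip_pass hsh hshks' l.length l le_rfl
      (noCasc_of_triggers (fun t ht => htr t (by rw [allTrigs]; exact List.mem_append_left _ ht)))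

-- the concrete key table of aa_three2one ...
lemma goodKeys_aa : goodKeys aaKeys = true := by decide

lemma allTrigs_aa : allTrigs aaKeys =
    ["Prohe".toList, "Thrrp".toList, "Thryr".toList, "Glylu".toList] := by decide

lemma foldStr (ks : List (String × String)) : ∀ s : String,
    (List.foldl (fun s kv => PySem.Str.replace s kv.1 kv.2) s ks).toList =
      List.foldl (fun m (kv : String × String) => PySem.Chars.replace m kv.1.toList kv.2.toList) s.toList ks := by
  induction ks with
  | nil => intro s; simp
  | cons kv t ih =>
    intro s
    rw [List.foldl_cons, List.foldl_cons, ih, PySem.Str.toList_replace]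

lemma aad_eq : aaDictA.map (fun kv => (pyCapitalize (PySem.Str.lower kv.1), kv.2)) =
    aaKeys.map (fun kv => (String.ofList kv.1, String.ofList [kv.2])) := by decide

lemma A_toList (p : String) :
    (aa_three2one p).toList =
      List.foldl (fun m (kv : List Char × Char) => PySem.Chars.replace m kv.1 [kv.2]) p.toList aaKeys := by
  show (List.foldl _ p _).toList = _
  rw [show aaDictA.map (fun kv => (pyCapitalize (PySem.Str.lower kv.1), kv.2)) =
        aaKeys.map (fun kv => (String.ofList kv.1, String.ofList [kv.2])) from aad_eq]
  rw [foldStr, List.foldl_map]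
  simp [String.toList_ofList]

-- fuel-structural twin of bGo, for kernel evaluation at the witness
def bGoF (ks : List (List Char × Char)) : Nat → List Char → List Char
  | 0, l => l
  | _ + 1, [] => []
  | f + 1, c :: t =>
    match ks.lookup ((c :: t).take 3) with
    | some v => v :: bGoF ks f (t.drop 2)
    | none   => c :: bGoF ks f t

lemma bGo_eq_bGoF (ks : List (List Char × Char)) :
    ∀ fuel l, l.length ≤ fuel → bGo ks l = bGoF ks fuel l := by
  intro fuel
  induction fuel with
  | zero => intro l h; simp at h; simp [h, bGoF, bGo_nil']
  | succ f ih =>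
    intro l h
    cases l with
    | nil => simp [bGoF, bGo_nil']
    | cons c t =>
      rw [bGo, bGoF]
      cases hlk : List.lookup ((c :: t).take 3) ks with
      | some v =>
        exact congrArg _ (ih _ (by
          have hd : (List.drop 2 t).length = t.length - 2 := List.length_drop
          simp only [List.length_cons] at h
          omega))
      | none =>
        exact congrArg _ (ih _ (by simp only [List.length_cons] at h; omega))

lemma final_eq : ∀ (phgvs : String), ¬ D_aa_three2one phgvs → aa_three2one phgvs = aa_three2one_alt phgvs := by
  intro p hD
  have htr : ∀ t ∈ allTrigs aaKeys, ¬ t <:+: p.toList := by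
    rw [allTrigs_aa]
    intro t ht
    simp only [List.mem_cons, List.not_mem_nil, or_false] at ht
    rcases ht with rfl | rfl | rfl | rfl
    · exact fun hinf => hD (Or.inl ((PySem.Str.isIn_iff_infix _ _).mpr hinf))
    · exact fun hinf => hD (Or.inr (Or.inl ((PySem.Str.isIn_iff_infix _ _).mpr hinf)))
    · exact fun hinf => hD (Or.inr (Or.inr (Or.inl ((PySem.Str.isIn_iff_infix _ _).mpr hinf))))
    · exact fun hinf => hD (Or.inr (Or.inr (Or.inr ((PySem.Str.isIn_iff_infix _ _).mpr hinf))))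
  have := fold_eq_scan aaKeys goodKeys_aa p.toList htr
  have hA := A_toList p
  rw [this] at hA
  have : (aa_three2one p) = String.ofList (bGo aaKeys p.toList) := by
    rw [← hA, String.ofList_toList]
  rw [this]; rfl

-- fuel twin for kernel evaluation of the witness

-- ===== tightness development =====
def trigShape : List Char → Bool
  | [u2, a2, b2, x, y] => upC u2 && loC a2 && loC b2 && loC x && loC y
  | _ => false

def cascIn (k : List Char) (v : Char) (ks' : List (List Char × Char)) (l : List Char) : Prop :=
  ∃ x y, (k ++ [x, y]) <:+: l ∧ ks'.lookup [v, x, y] ≠ none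

lemma lookup_some_of_mem {α β : Type} [BEq α] [LawfulBEq α] {w : α} {v' : β}
    {ks : List (α × β)} (h : (w, v') ∈ ks) : ks.lookup w ≠ none := by
  induction ks with
  | nil => simp at h
  | cons p t ih =>
    obtain ⟨a, b⟩ := p
    by_cases hw : w = a
    · subst hw; simp [List.lookup_cons]
    · rcases List.mem_cons.mp h with h0 | h0
      · simp at h0; exact absurd h0.1 hw
      · have := ih h0
        simpa [List.lookup_cons, beq_eq_false_iff_ne.mpr hw] using this

-- a region in which the key never matches is copied verbatim by the pass
lemma copy_prefix {k : List Char} {v : Char} :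
    ∀ (t : List Char) fuel (m : List Char), t <+: m →
      (∀ j < t.length, ¬ (k.isPrefixOf (m.drop j) = true)) →
      t <+: rf k [v] fuel m := by
  intro t
  induction t with
  | nil => intro fuel m _ _; simp
  | cons c0 t' ih =>
    intro fuel m hp hnm
    cases fuel with
    | zero => simpa [rf] using hp
    | succ f =>
      obtain ⟨c, m', rfl, he, hp'⟩ : ∃ c m', m = c :: m' ∧ c0 = c ∧ t' <+: m' := by
        cases m with
        | nil => simp at hp
        | cons c m' =>
          obtain ⟨h1, h2⟩ := List.cons_prefix_cons.mp hp
          exact ⟨c, m', rfl, h1, h2⟩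
      subst he
      rw [rf, if_neg (by simpa using hnm 0 (by simp))]
      refine List.cons_prefix_cons.mpr ⟨rfl, ih f m' hp' ?_⟩
      intro j hj
      have := hnm (j + 1) (by simp at hj ⊢; omega)
      simpa using this

-- a trigger occurrence of a different key survives a pass
lemma survive {u a b v u2 a2 b2 x y : Char}
    (hu : upC u = true) (hla : loC a = true) (hlb : loC b = true)
    (hu2 : upC u2 = true) (ha2 : loC a2 = true) (hb2 : loC b2 = true)
    (hx : loC x = true) (hy : loC y = true)
    (hne : ([u2, a2, b2] : List Char) ≠ [u, a, b]) :
    ∀ fuel (m : List Char), [u2, a2, b2, x, y] <:+: m →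
      [u2, a2, b2, x, y] <:+: rf [u, a, b] [v] fuel m := by
  intro fuel
  induction fuel with
  | zero => intro m h; simpa [rf] using h
  | succ f ih =>
    intro m h
    cases m with
    | nil => have := h.length_le; simp at this
    | cons c m' =>
      by_cases hpre : ([u, a, b].isPrefixOf (c :: m')) = true
      · cases m' with
        | nil => simp [List.isPrefixOf] at hpre
        | cons d m'' =>
        cases m'' with
        | nil => simp [List.isPrefixOf] at hpre
        | cons e m3 =>
        obtain ⟨e1, e2, e3⟩ : u = c ∧ a = d ∧ b = e := by
          simpa [List.isPrefixOf] using hpre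
        subst e1; subst e2; subst e3
        rw [rf, if_pos hpre]
        have hdrop : List.drop [u, a, b].length (u :: a :: b :: m3) = m3 := by simp
        rw [hdrop]
        rcases List.infix_cons_iff.mp h with hp | h1
        · obtain ⟨s, hs⟩ := hp
          simp at hs
          exact absurd (by rw [hs.1, hs.2.1, hs.2.2.1]) hne
        · rcases List.infix_cons_iff.mp h1 with hp | h2
          · exact absurd (List.cons_prefix_cons.mp hp).1 (ne_of_up_lo hu2 hla)
          · rcases List.infix_cons_iff.mp h2 with hp | h3
            · exact absurd (List.cons_prefix_cons.mp hp).1 (ne_of_up_lo hu2 hlb)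
            · exact (ih m3 h3).trans (List.suffix_cons v _).isInfix
      · rcases List.infix_cons_iff.mp h with hp | hinf
        · obtain ⟨s, hs⟩ := hp
          obtain ⟨hc, hm⟩ : u2 = c ∧ a2 :: b2 :: x :: y :: s = m' := by
            simp at hs; exact ⟨hs.1, hs.2⟩
          subst hc; subst hm
          have hcp := copy_prefix (k := [u, a, b]) (v := v) [u2, a2, b2, x, y] (f + 1)
            (u2 :: a2 :: b2 :: x :: y :: s) ⟨s, rfl⟩ (by
            intro j hj
            simp only [List.length_cons, List.length_nil] at hj
            interval_cases j
            · exact hpre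
            · exact npre_of_ne (ne_of_up_lo hu ha2)
            · exact npre_of_ne (ne_of_up_lo hu hb2)
            · exact npre_of_ne (ne_of_up_lo hu hx)
            · exact npre_of_ne (ne_of_up_lo hu hy))
          exact hcp.isInfix
        · have := ih m' hinf
          rw [rf, if_neg hpre]
          exact this.trans (List.suffix_cons c _).isInfix

lemma bGo_lo_step {kss : List (List Char × Char)} (hss : ∀ kv ∈ kss, shapedKV kv = true)
    {c : Char} (hc : loC c = true) (t : List Char) : bGo kss (c :: t) = c :: bGo kss t := by
  rw [bGo]
  cases hlk : List.lookup ((c :: t).take 3) kss with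
  | none => rfl
  | some v' =>
    obtain ⟨u', a', b', hw, hu', _, _⟩ := lookup_shape hss hlk
    have hcu : c = u' := by
      rw [List.take_succ_cons] at hw
      simp at hw
      exact hw.1
    exact absurd hcu.symm (ne_of_up_lo hu' hc)

-- one pass can only shorten the scan result (cascades shorten, everything else is preserved)
lemma zip_le {u a b : Char} {v : Char} {ks' : List (List Char × Char)}
    (hkv : shapedKV ([u, a, b], v) = true) (hs : ∀ kv ∈ ks', shapedKV kv = true) :
    ∀ fuel (l : List Char), l.length ≤ fuel →
      (bGo ks' (rf [u, a, b] [v] fuel l)).length ≤ (bGo (([u, a, b], v) :: ks') l).length := by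
  have hu : upC u = true := by simp [shapedKV] at hkv; exact hkv.1.1.1
  have hla : loC a = true := by simp [shapedKV] at hkv; exact hkv.1.1.2
  have hlb : loC b = true := by simp [shapedKV] at hkv; exact hkv.1.2
  have hv : upC v = true := by simp [shapedKV] at hkv; exact hkv.2
  have hcons : ∀ kv ∈ (([u, a, b], v) :: ks'), shapedKV kv = true := by
    intro kv hkv'
    rcases List.mem_cons.mp hkv' with h | h
    · subst h; exact hkv
    · exact hs _ h
  intro fuel
  induction fuel using Nat.strong_induction_on with
  | _ fuel ih =>
  intro l hlen
  cases l with
  | nil => rw [rf_nil, bGo_nil', bGo_nil']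
  | cons c1 t1 =>
  cases t1 with
  | nil =>
    obtain ⟨f, rfl⟩ : ∃ f, fuel = f + 1 := ⟨fuel - 1, by simp at hlen; omega⟩
    rw [rf, if_neg (by simp [List.isPrefixOf]), rf_nil, bGo_single hs, bGo_single hcons]
  | cons c2 t2 =>
  cases t2 with
  | nil =>
    obtain ⟨f, rfl⟩ : ∃ f, fuel = f + 2 := ⟨fuel - 2, by simp at hlen; omega⟩
    rw [rf, if_neg npre_short2, rf, if_neg (by simp [List.isPrefixOf]), rf_nil,
        bGo_pair hs, bGo_pair hcons]
  | cons c3 rest =>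
    obtain ⟨f, rfl⟩ : ∃ f, fuel = f + 1 := ⟨fuel - 1, by simp at hlen; omega⟩
    have hlen' : rest.length + 3 ≤ f + 1 := by simpa using hlen
    by_cases hpre : ([u, a, b].isPrefixOf (c1 :: c2 :: c3 :: rest)) = true
    · obtain ⟨h1, h2, h3⟩ : u = c1 ∧ a = c2 ∧ b = c3 := by
        simpa [List.isPrefixOf] using hpre
      subst h1; subst h2; subst h3
      rw [rf, if_pos hpre]
      simp only [show List.drop [u, a, b].length (u :: a :: b :: rest) = rest from by simp,
        List.singleton_append]
      have hRHS : bGo (([u, a, b], v) :: ks') (u :: a :: b :: rest)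
          = v :: bGo (([u, a, b], v) :: ks') rest := by
        rw [bGo]
        simp only [List.take_succ_cons, List.take_zero, List.lookup_cons, List.drop_succ_cons,
          List.drop_zero]
        rw [show (([u, a, b] : List Char) == [u, a, b]) = true from by simp]
      rw [hRHS]
      cases hlk : List.lookup ((v :: rf [u, a, b] [v] f rest).take 3) ks' with
      | none =>
        rw [bGo, hlk]
        simp only [List.length_cons, Nat.add_le_add_iff_right]
        exact ih f (by omega) rest (by omega)
      | some v'' =>
        -- a cascade fires: the pass side consumes two raw chars more
        obtain ⟨u', a', b', hw, hu', hla', hlb'⟩ := lookup_shape hs hlk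
        simp only [List.take] at hw
        have htk : (rf [u, a, b] [v] f rest).take 2 = [a', b'] := by
          cases hw0 : (rf [u, a, b] [v] f rest) with
          | nil => rw [hw0] at hw; simp at hw
          | cons z zs =>
            rw [hw0] at hw
            cases zs with
            | nil => simp at hw
            | cons z' zs' => simp at hw ⊢; exact ⟨hw.2.1, hw.2.2⟩
        have hraw := two_raw (u := u) (a := a) (b := b) hv hla' hlb' htk
        have hrest := take2_shape hraw
        obtain ⟨f'', rfl⟩ : ∃ f'', f = f'' + 2 := ⟨f - 2, by
          rw [hrest] at hlen'; simp at hlen'; omega⟩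
        have hrf : rf [u, a, b] [v] (f'' + 2) rest = a' :: b' :: rf [u, a, b] [v] f'' (rest.drop 2) := by
          conv_lhs => rw [hrest]
          rw [rf, if_neg (npre_of_ne (ne_of_up_lo hu hla'))]
          rw [rf, if_neg (npre_of_ne (ne_of_up_lo hu hlb'))]
        rw [bGo, hlk, hrf]
        simp only [List.drop_succ_cons, List.drop_zero, List.length_cons]
        have hstep1 : bGo (([u, a, b], v) :: ks') rest
            = a' :: b' :: bGo (([u, a, b], v) :: ks') (rest.drop 2) := by
          rw [hrest, bGo_lo_step hcons hla', bGo_lo_step hcons hlb']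
          simp only [List.drop_succ_cons, List.drop_zero]
        rw [hstep1]
        simp only [List.length_cons]
        have := ih f'' (by omega) (rest.drop 2) (by rw [hrest] at hlen'; simp at hlen' ⊢; omega)
        omega
    · have hne : ¬ (([c1, c2, c3] : List Char) = [u, a, b]) := by
        intro h
        simp at h
        exact hpre (by simp [List.isPrefixOf, h.1, h.2.1, h.2.2])
      rw [rf, if_neg hpre]
      cases hlk3 : List.lookup [c1, c2, c3] ks' with
      | some v' =>
        obtain ⟨u', a', b', hw, hu', hla', hlb'⟩ := lookup_shape hs hlk3
        obtain ⟨e1, e2, e3⟩ : c1 = u' ∧ c2 = a' ∧ c3 = b' := by simpa using hw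
        subst e1; subst e2; subst e3
        obtain ⟨f'', rfl⟩ : ∃ f'', f = f'' + 2 := ⟨f - 2, by omega⟩
        rw [rf, if_neg (npre_of_ne (ne_of_up_lo hu hla'))]
        rw [rf, if_neg (npre_of_ne (ne_of_up_lo hu hlb'))]
        rw [bGo]
        simp only [List.take_succ_cons, List.take_zero, hlk3, List.drop_succ_cons, List.drop_zero]
        rw [bGo]
        simp only [List.take_succ_cons, List.take_zero, List.lookup_cons, List.drop_succ_cons,
          List.drop_zero]
        rw [show (([c1, c2, c3] : List Char) == [u, a, b]) = false from beq_eq_false_iff_ne.mpr hne]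
        rw [hlk3]
        simp only [List.length_cons, Nat.add_le_add_iff_right]
        exact ih f'' (by omega) rest (by omega)
      | none =>
        have hnone : List.lookup ((c1 :: rf [u, a, b] [v] f (c2 :: c3 :: rest)).take 3) ks' = none := by
          cases hlk : List.lookup ((c1 :: rf [u, a, b] [v] f (c2 :: c3 :: rest)).take 3) ks' with
          | none => rfl
          | some v'' =>
            obtain ⟨u', a', b', hw, hu', hla', hlb'⟩ := lookup_shape hs hlk
            simp only [List.take] at hw
            have htk : (rf [u, a, b] [v] f (c2 :: c3 :: rest)).take 2 = [a', b'] := by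
              cases hw0 : (rf [u, a, b] [v] f (c2 :: c3 :: rest)) with
              | nil => rw [hw0] at hw; simp at hw
              | cons z zs =>
                rw [hw0] at hw
                cases zs with
                | nil => simp at hw
                | cons z' zs' => simp at hw ⊢; exact ⟨hw.2.1, hw.2.2⟩
            have hraw := two_raw (u := u) (a := a) (b := b) hv hla' hlb' htk
            obtain ⟨e2, e3⟩ : c2 = a' ∧ c3 = b' := by simpa using hraw
            have htk3 : (c1 :: rf [u, a, b] [v] f (c2 :: c3 :: rest)).take 3 = [c1, c2, c3] := by
              simp only [List.take_succ_cons, htk, ← e2, ← e3]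
            rw [htk3] at hlk
            rw [hlk3] at hlk
            cases hlk
        rw [bGo, hnone]
        rw [bGo]
        simp only [List.take_succ_cons, List.take_zero, List.lookup_cons]
        rw [show (([c1, c2, c3] : List Char) == [u, a, b]) = false from beq_eq_false_iff_ne.mpr hne]
        rw [hlk3]
        simp only [List.length_cons, Nat.add_le_add_iff_right]
        exact ih f (by omega) (c2 :: c3 :: rest) (by simp only [List.length_cons] at hlen' ⊢; omega)

-- with a live cascade in l, one pass strictly shortens the scan result
lemma zip_lt {u a b : Char} {v : Char} {ks' : List (List Char × Char)}
    (hkv : shapedKV ([u, a, b], v) = true) (hs : ∀ kv ∈ ks', shapedKV kv = true) :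
    ∀ fuel (l : List Char), l.length ≤ fuel → cascIn [u, a, b] v ks' l →
      (bGo ks' (rf [u, a, b] [v] fuel l)).length < (bGo (([u, a, b], v) :: ks') l).length := by
  have hu : upC u = true := by simp [shapedKV] at hkv; exact hkv.1.1.1
  have hla : loC a = true := by simp [shapedKV] at hkv; exact hkv.1.1.2
  have hlb : loC b = true := by simp [shapedKV] at hkv; exact hkv.1.2
  have hv : upC v = true := by simp [shapedKV] at hkv; exact hkv.2
  have hcons : ∀ kv ∈ (([u, a, b], v) :: ks'), shapedKV kv = true := by
    intro kv hkv'
    rcases List.mem_cons.mp hkv' with h | h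
    · subst h; exact hkv
    · exact hs _ h
  intro fuel
  induction fuel using Nat.strong_induction_on with
  | _ fuel ih =>
  intro l hlen hc
  obtain ⟨x, y, hinf, hlks⟩ := hc
  cases l with
  | nil => have := hinf.length_le; simp at this
  | cons c1 t1 =>
  cases t1 with
  | nil => have := hinf.length_le; simp at this
  | cons c2 t2 =>
  cases t2 with
  | nil => have := hinf.length_le; simp at this
  | cons c3 rest =>
    obtain ⟨f, rfl⟩ : ∃ f, fuel = f + 1 := ⟨fuel - 1, by simp at hlen; omega⟩
    have hlen' : rest.length + 3 ≤ f + 1 := by simpa using hlen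
    -- the key of the cascade occurrence is lowercase after its head
    have hxy : loC x = true ∧ loC y = true := by
      cases hlkv : List.lookup [v, x, y] ks' with
      | none => exact absurd hlkv hlks
      | some w =>
        obtain ⟨u', a', b', hw, _, hla', hlb'⟩ := lookup_shape hs hlkv
        simp at hw
        exact ⟨by rw [hw.2.1]; exact hla', by rw [hw.2.2]; exact hlb'⟩
    obtain ⟨hxlo, hylo⟩ := hxy
    by_cases hpre : ([u, a, b].isPrefixOf (c1 :: c2 :: c3 :: rest)) = true
    · obtain ⟨h1, h2, h3⟩ : u = c1 ∧ a = c2 ∧ b = c3 := by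
        simpa [List.isPrefixOf] using hpre
      subst h1; subst h2; subst h3
      rw [rf, if_pos hpre]
      simp only [show List.drop [u, a, b].length (u :: a :: b :: rest) = rest from by simp,
        List.singleton_append]
      have hRHS : bGo (([u, a, b], v) :: ks') (u :: a :: b :: rest)
          = v :: bGo (([u, a, b], v) :: ks') rest := by
        rw [bGo]
        simp only [List.take_succ_cons, List.take_zero, List.lookup_cons, List.drop_succ_cons,
          List.drop_zero]
        rw [show (([u, a, b] : List Char) == [u, a, b]) = true from by simp]
      rw [hRHS]
      cases hlk : List.lookup ((v :: rf [u, a, b] [v] f rest).take 3) ks' with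
      | some v'' =>
        obtain ⟨u', a', b', hw, hu', hla', hlb'⟩ := lookup_shape hs hlk
        simp only [List.take] at hw
        have htk : (rf [u, a, b] [v] f rest).take 2 = [a', b'] := by
          cases hw0 : (rf [u, a, b] [v] f rest) with
          | nil => rw [hw0] at hw; simp at hw
          | cons z zs =>
            rw [hw0] at hw
            cases zs with
            | nil => simp at hw
            | cons z' zs' => simp at hw ⊢; exact ⟨hw.2.1, hw.2.2⟩
        have hraw := two_raw (u := u) (a := a) (b := b) hv hla' hlb' htk
        have hrest := take2_shape hraw
        obtain ⟨f'', rfl⟩ : ∃ f'', f = f'' + 2 := ⟨f - 2, by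
          rw [hrest] at hlen'; simp at hlen'; omega⟩
        have hrf : rf [u, a, b] [v] (f'' + 2) rest = a' :: b' :: rf [u, a, b] [v] f'' (rest.drop 2) := by
          conv_lhs => rw [hrest]
          rw [rf, if_neg (npre_of_ne (ne_of_up_lo hu hla'))]
          rw [rf, if_neg (npre_of_ne (ne_of_up_lo hu hlb'))]
        rw [bGo, hlk, hrf]
        simp only [List.drop_succ_cons, List.drop_zero, List.length_cons]
        have hstep1 : bGo (([u, a, b], v) :: ks') rest
            = a' :: b' :: bGo (([u, a, b], v) :: ks') (rest.drop 2) := by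
          rw [hrest, bGo_lo_step hcons hla', bGo_lo_step hcons hlb']
          simp only [List.drop_succ_cons, List.drop_zero]
        rw [hstep1]
        simp only [List.length_cons]
        have := zip_le hkv hs f'' (rest.drop 2) (by rw [hrest] at hlen'; simp at hlen' ⊢; omega)
        omega
      | none =>
        -- the cascade occurrence cannot sit at the head (it would have fired), so it is in rest
        have hrest' : ([u, a, b] ++ [x, y]) <:+: rest := by
          rcases List.infix_cons_iff.mp hinf with hp | h1
          · exfalso
            obtain ⟨s, hs'⟩ := hp
            have hre : rest = x :: y :: s := by
              simp at hs'
              exact hs'.symm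
            subst hre
            obtain ⟨f'', rfl⟩ : ∃ f'', f = f'' + 2 := ⟨f - 2, by simp at hlen'; omega⟩
            have hrf : rf [u, a, b] [v] (f'' + 2) (x :: y :: s)
                = x :: y :: rf [u, a, b] [v] f'' s := by
              rw [rf, if_neg (npre_of_ne (ne_of_up_lo hu hxlo))]
              rw [rf, if_neg (npre_of_ne (ne_of_up_lo hu hylo))]
            rw [hrf] at hlk
            simp only [List.take_succ_cons, List.take_zero] at hlk
            exact hlks (by
              cases hlkv : List.lookup [v, x, y] ks' with
              | none => rfl
              | some w => rw [hlkv] at hlk; cases hlk)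
          · rcases List.infix_cons_iff.mp h1 with hp | h2
            · exact absurd (List.cons_prefix_cons.mp hp).1 (ne_of_up_lo hu hla)
            · rcases List.infix_cons_iff.mp h2 with hp | h3
              · exact absurd (List.cons_prefix_cons.mp hp).1 (ne_of_up_lo hu hlb)
              · exact h3
        rw [bGo, hlk]
        simp only [List.length_cons, Nat.add_lt_add_iff_right]
        exact ih f (by omega) rest (by omega) ⟨x, y, hrest', hlks⟩
    · have hne : ¬ (([c1, c2, c3] : List Char) = [u, a, b]) := by
        intro h
        simp at h
        exact hpre (by simp [List.isPrefixOf, h.1, h.2.1, h.2.2])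
      have hnotpre : ¬ (([u, a, b] ++ [x, y]) <+: (c1 :: c2 :: c3 :: rest)) := by
        intro hp
        exact hpre (List.isPrefixOf_iff_prefix.mpr ((List.prefix_append _ _).trans hp))
      rw [rf, if_neg hpre]
      cases hlk3 : List.lookup [c1, c2, c3] ks' with
      | some v' =>
        obtain ⟨u', a', b', hw, hu', hla', hlb'⟩ := lookup_shape hs hlk3
        obtain ⟨e1, e2, e3⟩ : c1 = u' ∧ c2 = a' ∧ c3 = b' := by simpa using hw
        subst e1; subst e2; subst e3
        have hrest' : ([u, a, b] ++ [x, y]) <:+: rest := by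
          rcases List.infix_cons_iff.mp hinf with hp | h1
          · exact absurd hp hnotpre
          · rcases List.infix_cons_iff.mp h1 with hp | h2
            · exact absurd (List.cons_prefix_cons.mp hp).1 (ne_of_up_lo hu hla')
            · rcases List.infix_cons_iff.mp h2 with hp | h3
              · exact absurd (List.cons_prefix_cons.mp hp).1 (ne_of_up_lo hu hlb')
              · exact h3
        obtain ⟨f'', rfl⟩ : ∃ f'', f = f'' + 2 := ⟨f - 2, by omega⟩
        rw [rf, if_neg (npre_of_ne (ne_of_up_lo hu hla'))]
        rw [rf, if_neg (npre_of_ne (ne_of_up_lo hu hlb'))]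
        rw [bGo]
        simp only [List.take_succ_cons, List.take_zero, hlk3, List.drop_succ_cons, List.drop_zero]
        rw [bGo]
        simp only [List.take_succ_cons, List.take_zero, List.lookup_cons, List.drop_succ_cons,
          List.drop_zero]
        rw [show (([c1, c2, c3] : List Char) == [u, a, b]) = false from beq_eq_false_iff_ne.mpr hne]
        rw [hlk3]
        simp only [List.length_cons, Nat.add_lt_add_iff_right]
        exact ih f'' (by omega) rest (by omega) ⟨x, y, hrest', hlks⟩
      | none =>
        have htail : ([u, a, b] ++ [x, y]) <:+: (c2 :: c3 :: rest) := by
          rcases List.infix_cons_iff.mp hinf with hp | h1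
          · exact absurd hp hnotpre
          · exact h1
        have hnone : List.lookup ((c1 :: rf [u, a, b] [v] f (c2 :: c3 :: rest)).take 3) ks' = none := by
          cases hlk : List.lookup ((c1 :: rf [u, a, b] [v] f (c2 :: c3 :: rest)).take 3) ks' with
          | none => rfl
          | some v'' =>
            obtain ⟨u', a', b', hw, hu', hla', hlb'⟩ := lookup_shape hs hlk
            simp only [List.take] at hw
            have htk : (rf [u, a, b] [v] f (c2 :: c3 :: rest)).take 2 = [a', b'] := by
              cases hw0 : (rf [u, a, b] [v] f (c2 :: c3 :: rest)) with
              | nil => rw [hw0] at hw; simp at hw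
              | cons z zs =>
                rw [hw0] at hw
                cases zs with
                | nil => simp at hw
                | cons z' zs' => simp at hw ⊢; exact ⟨hw.2.1, hw.2.2⟩
            have hraw := two_raw (u := u) (a := a) (b := b) hv hla' hlb' htk
            obtain ⟨e2, e3⟩ : c2 = a' ∧ c3 = b' := by simpa using hraw
            have htk3 : (c1 :: rf [u, a, b] [v] f (c2 :: c3 :: rest)).take 3 = [c1, c2, c3] := by
              simp only [List.take_succ_cons, htk, ← e2, ← e3]
            rw [htk3] at hlk
            rw [hlk3] at hlk
            cases hlk
        rw [bGo, hnone]
        rw [bGo]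
        simp only [List.take_succ_cons, List.take_zero, List.lookup_cons]
        rw [show (([c1, c2, c3] : List Char) == [u, a, b]) = false from beq_eq_false_iff_ne.mpr hne]
        rw [hlk3]
        simp only [List.length_cons, Nat.add_lt_add_iff_right]
        exact ih f (by omega) (c2 :: c3 :: rest)
          (by simp only [List.length_cons] at hlen' ⊢; omega) ⟨x, y, htail, hlks⟩

def tightKeys : List (List Char × Char) → Bool
  | [] => true
  | (k, _) :: ks' => (allTrigs ks').all (fun t => trigShape t && decide (t.take 3 ≠ k)) && tightKeys ks'

lemma tightKeys_aa : tightKeys aaKeys = true := by decide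

lemma bGo_empty : ∀ l, bGo [] l = l := by
  intro l
  induction l with
  | nil => rw [bGo_nil']
  | cons c t iht => rw [bGo]; simp only [List.lookup_nil]; rw [iht]

lemma good_parts {k : List Char} {v : Char} {ks' : List (List Char × Char)}
    (hg : goodKeys ((k, v) :: ks') = true) :
    shapedKV (k, v) = true ∧ (∀ t ∈ allTrigs ks', v ∉ t) ∧ goodKeys ks' = true := by
  rw [goodKeys] at hg
  simp only [Bool.and_eq_true] at hg
  refine ⟨hg.1.1, ?_, hg.2⟩
  intro t ht
  have := (List.all_eq_true.mp hg.1.2) t ht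
  simpa using this

lemma fold_len_le : ∀ ks, goodKeys ks = true → ∀ l : List Char,
    (List.foldl (fun m (kv : List Char × Char) => PySem.Chars.replace m kv.1 [kv.2]) l ks).length
      ≤ (bGo ks l).length := by
  intro ks
  induction ks with
  | nil => intro _ l; rw [List.foldl_nil, bGo_empty]
  | cons p ks' ih =>
    obtain ⟨k, v⟩ := p
    intro hg l
    obtain ⟨hsh, _, hg'⟩ := good_parts hg
    obtain ⟨u, a, b, rfl⟩ : ∃ u a b, k = [u, a, b] := by
      match k, hsh with
      | [u, a, b], _ => exact ⟨u, a, b, rfl⟩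
    rw [List.foldl_cons]
    rw [replace_eq_rf [u, a, b] [v] l (by simp)]
    calc (List.foldl _ (rf [u, a, b] [v] l.length l) ks').length
        ≤ (bGo ks' (rf [u, a, b] [v] l.length l)).length := ih hg' _
      _ ≤ (bGo (([u, a, b], v) :: ks') l).length :=
          zip_le hsh (shaped_of_good ks' hg') l.length l le_rfl

lemma fold_len_lt : ∀ ks, goodKeys ks = true → tightKeys ks = true →
    ∀ (l t : List Char), t ∈ allTrigs ks → t <:+: l →
    (List.foldl (fun m (kv : List Char × Char) => PySem.Chars.replace m kv.1 [kv.2]) l ks).length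
      < (bGo ks l).length := by
  intro ks
  induction ks with
  | nil => intro _ _ l t ht; simp [allTrigs] at ht
  | cons p ks' ih =>
    obtain ⟨k, v⟩ := p
    intro hg htight l t ht hinf
    obtain ⟨hsh, _, hg'⟩ := good_parts hg
    obtain ⟨u, a, b, rfl⟩ : ∃ u a b, k = [u, a, b] := by
      match k, hsh with
      | [u, a, b], _ => exact ⟨u, a, b, rfl⟩
    have hshks' := shaped_of_good ks' hg'
    rw [List.foldl_cons, replace_eq_rf [u, a, b] [v] l (by simp)]
    rw [allTrigs] at ht
    rcases List.mem_append.mp ht with hth | htt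
    · -- a trigger of the head key: a cascade is live in l
      obtain ⟨kv2, hkv2, ht2⟩ := List.mem_filterMap.mp hth
      obtain ⟨kw, w2⟩ := kv2
      cases kw with
      | nil => simp at ht2
      | cons w0 wrest =>
        change (if w0 = v then some ([u, a, b] ++ wrest) else none) = some t at ht2
        by_cases hw0v : w0 = v
        · subst hw0v
          rw [if_pos rfl] at ht2
          obtain ⟨x, y, hxy⟩ : ∃ x y, wrest = [x, y] := by
            have := hshks' _ hkv2
            match wrest, this with
            | [x, y], _ => exact ⟨x, y, rfl⟩
          subst hxy
          obtain ⟨rfl⟩ : t = [u, a, b] ++ [x, y] := by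
            injection ht2 with h0; exact h0.symm
          have hcasc : cascIn [u, a, b] w0 ks' l := by
            exact ⟨x, y, hinf, lookup_some_of_mem hkv2⟩
          calc (List.foldl _ (rf [u, a, b] [w0] l.length l) ks').length
              ≤ (bGo ks' (rf [u, a, b] [w0] l.length l)).length := fold_len_le ks' hg' _
            _ < (bGo (([u, a, b], w0) :: ks') l).length :=
                zip_lt hsh hshks' l.length l le_rfl hcasc
        · rw [if_neg hw0v] at ht2; cases ht2
    · -- a trigger of a later key: it survives the head pass
      rw [tightKeys] at htight
      simp only [Bool.and_eq_true] at htight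
      have hts := (List.all_eq_true.mp htight.1) t htt
      simp only [Bool.and_eq_true, decide_eq_true_eq] at hts
      obtain ⟨htshape, htne⟩ := hts
      obtain ⟨u2, a2, b2, x, y, rfl⟩ : ∃ u2 a2 b2 x y, t = [u2, a2, b2, x, y] := by
        match t, htshape with
        | [u2, a2, b2, x, y], _ => exact ⟨u2, a2, b2, x, y, rfl⟩
      simp only [trigShape, Bool.and_eq_true] at htshape
      have hu : upC u = true := by simp [shapedKV] at hsh; exact hsh.1.1.1
      have hla : loC a = true := by simp [shapedKV] at hsh; exact hsh.1.1.2
      have hlb : loC b = true := by simp [shapedKV] at hsh; exact hsh.1.2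
      have hsur := survive (v := v) hu hla hlb htshape.1.1.1.1 htshape.1.1.1.2 htshape.1.1.2
        htshape.1.2 htshape.2 (by simpa using htne) l.length l hinf
      calc (List.foldl _ (rf [u, a, b] [v] l.length l) ks').length
          < (bGo ks' (rf [u, a, b] [v] l.length l)).length := ih hg' htight.2 _ _ htt hsur
        _ ≤ (bGo (([u, a, b], v) :: ks') l).length :=
            zip_le hsh hshks' l.length l le_rfl

-- inside D_ the fold output is strictly shorter than the scan output, so they always differ
lemma tight_ne : ∀ (phgvs : String), D_aa_three2one phgvs →
    aa_three2one phgvs ≠ aa_three2one_alt phgvs := by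
  intro p hD hEq
  have hl : ∃ t ∈ allTrigs aaKeys, t <:+: p.toList := by
    rw [allTrigs_aa]
    rcases hD with h | h | h | h
    · exact ⟨"Prohe".toList, by simp, (PySem.Str.isIn_iff_infix _ _).mp h⟩
    · exact ⟨"Thrrp".toList, by simp, (PySem.Str.isIn_iff_infix _ _).mp h⟩
    · exact ⟨"Thryr".toList, by simp, (PySem.Str.isIn_iff_infix _ _).mp h⟩
    · exact ⟨"Glylu".toList, by simp, (PySem.Str.isIn_iff_infix _ _).mp h⟩
  obtain ⟨t, ht, hinf⟩ := hl
  have hlt := fold_len_lt aaKeys goodKeys_aa tightKeys_aa p.toList t ht hinf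
  have hlen : (aa_three2one p).toList.length < (bGo aaKeys p.toList).length := by
    rw [A_toList p]; exact hlt
  have hB : (aa_three2one_alt p).toList = bGo aaKeys p.toList := String.toList_ofList
  rw [hEq, hB] at hlen
  exact lt_irrefl _ hlen

-- ===== VERDICT (by name: the statements are the Claim_ definitions above) =====
theorem aa_three2one_spec : Claim_unchanged_aa_three2one := by
  intro phgvs _ hD
  exact final_eq phgvs hD

set_option maxRecDepth 8192 in
theorem aa_three2one_changed : Claim_changed_aa_three2one := by
  unfold Claim_changed_aa_three2one
  refine ⟨by decide, by decide, by decide, ?_, by decide⟩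
  rw [show aa_three2one_alt pvDiffWitness_aa_three2one
        = String.ofList (bGo aaKeys "Prohe".toList) from rfl]
  rw [bGo_eq_bGoF aaKeys 5 _ (by decide)]
  decide

theorem aa_three2one_tight : Claim_exact_aa_three2one := by
  intro phgvs _ hD
  exact tight_ne phgvs hD
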